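-- pv_equiv track=rewrite | github.com/rnaster/Today-I-Learned | 2019/1909/190928.py | func
-- ===== SOURCE A (Python) =====
-- def func(p, q, r):
--     if p == 1:
--         return q*2 + r
--     a = 2 ** (2*p-2)
--     b = 2 ** (p-1)
--     if q >= b and r >= b:
--         return 3 * a + func(p-1, q - b, r - b)
--     if q >= b:
--         return 2 * a + func(p-1, q - b, r)
--     if r >= b:
--         return a + func(p-1, q, r - b)
--     return func(p-1, q, r)
-- ===== SOURCE B (Python) =====
-- def func(p, q, r):
--     # Iterative top-down pass: b runs through 2**(p-1), ..., 2, maintained by shifting;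
--     # the interleaved digits are accumulated into acc.
--     acc = 0
--     b = 1 << (p - 1)
--     while b > 1:
--         if q >= b:
--             acc += 2 * b * b
--             q -= b
--         if r >= b:
--             acc += b * b
--             r -= b
--         b >>= 1
--     return acc + q * 2 + r
-- ===== Notes on version B (the rewrite author's own statement) =====
-- stated objective: alternative
-- what changed: Replaces the p-deep recursion that recomputes 2**(2p-2) and 2**(p-1) at every level with a single iterative while loop that keeps the power of two in a variable updated by one shift per level and accumulates the interleaved digits.
import Mathlib
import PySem

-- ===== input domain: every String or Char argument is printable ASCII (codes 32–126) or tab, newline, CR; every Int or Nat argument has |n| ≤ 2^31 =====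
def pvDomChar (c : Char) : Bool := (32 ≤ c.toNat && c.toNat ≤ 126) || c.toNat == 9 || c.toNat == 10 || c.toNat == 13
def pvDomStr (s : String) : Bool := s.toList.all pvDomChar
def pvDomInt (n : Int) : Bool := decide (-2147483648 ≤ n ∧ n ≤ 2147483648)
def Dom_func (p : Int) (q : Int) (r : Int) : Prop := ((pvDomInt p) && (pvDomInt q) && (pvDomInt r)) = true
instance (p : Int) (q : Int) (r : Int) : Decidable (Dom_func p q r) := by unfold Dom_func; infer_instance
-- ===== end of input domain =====

-- B replaces A's p-deep recursion (which recomputes 2**(2p-2) and 2**(p-1) at every level) by a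
-- single iterative loop that maintains the power of two b by shifting and accumulates the digits
-- (objective: alternative decomposition, iteration instead of recursion).


-- ===== PORT A =====
-- Literal port of A. For p ≤ 0 the Python recursion never terminates (RecursionError);
-- the 'p ≤ 0' guard only makes the Lean function total there — those inputs are outside Pre_func.
def func (p : Int) (q : Int) (r : Int) : Int :=
  if p = 1 then q * 2 + r
  else if p ≤ 0 ∨ p = 0 then 0  -- unreachable under Pre_func (Python raises here); p ≤ 0 totality guard
  else
    let a : Int := 2 ^ (2 * p - 2).toNat
    let b : Int := 2 ^ (p - 1).toNat
    if q ≥ b ∧ r ≥ b then 3 * a + func (p - 1) (q - b) (r - b)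
    else if q ≥ b then 2 * a + func (p - 1) (q - b) r
    else if r ≥ b then a + func (p - 1) q (r - b)
    else func (p - 1) q r
termination_by p.toNat
decreasing_by all_goals omega

-- ===== PORT B =====
-- the while loop of Source B: state (b, q, r, acc); b >>= 1 on a positive b is b / 2
def funcAltLoop (b : Int) (q : Int) (r : Int) (acc : Int) : Int :=
  if 1 < b then
    let acc1 := if q ≥ b then acc + 2 * b * b else acc
    let q1   := if q ≥ b then q - b else q
    let acc2 := if r ≥ b then acc1 + b * b else acc1
    let r1   := if r ≥ b then r - b else r
    funcAltLoop (b / 2) q1 r1 acc2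
  else acc + q * 2 + r
termination_by b.toNat
decreasing_by omega

def func_alt (p : Int) (q : Int) (r : Int) : Int :=
  funcAltLoop (2 ^ (p - 1).toNat) q r 0  -- 1 << (p-1)

-- ===== PRECONDITION & SPEC =====
-- Pre_func excludes exactly p ≤ 0, where Python A raises (unbounded recursion → RecursionError).
def Pre_func (p : Int) (q : Int) (r : Int) : Prop := 1 ≤ p
instance (p : Int) (q : Int) (r : Int) : Decidable (Pre_func p q r) := by unfold Pre_func; infer_instance
def pvWitness_func : Int × Int × Int := (3, 5, 2)

def Spec_func (p : Int) (q : Int) (r : Int) (out : Int) : Prop := out = func_alt p q r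
instance (p : Int) (q : Int) (r : Int) (out : Int) : Decidable (Spec_func p q r out) := by unfold Spec_func; infer_instance

-- ===== CLAIM (what is proved, stated in full; the proofs are below) =====
def Claim_equal_func : Prop := ∀ (p : Int) (q : Int) (r : Int), Dom_func p q r → Pre_func p q r → Spec_func p q r (func p q r)

-- ===== LEMMAS AND PROOFS =====

-- A's recursion unfolded one level at p = n + 2, with the powers written over ℕ exponents
lemma func_step (n : ℕ) (q r : Int) :
    func ((n : Int) + 2) q r =
      (if q ≥ 2 ^ (n + 1) ∧ r ≥ 2 ^ (n + 1) then
        3 * 2 ^ (2 * n + 2) + func ((n : Int) + 1) (q - 2 ^ (n + 1)) (r - 2 ^ (n + 1))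
      else if q ≥ 2 ^ (n + 1) then 2 * 2 ^ (2 * n + 2) + func ((n : Int) + 1) (q - 2 ^ (n + 1)) r
      else if r ≥ 2 ^ (n + 1) then 2 ^ (2 * n + 2) + func ((n : Int) + 1) q (r - 2 ^ (n + 1))
      else func ((n : Int) + 1) q r) := by
  rw [func]
  rw [if_neg (show ¬((n : Int) + 2 = 1) by omega),
      if_neg (show ¬((n : Int) + 2 ≤ 0 ∨ (n : Int) + 2 = 0) by omega)]
  have ha : (2 * ((n : Int) + 2) - 2).toNat = 2 * n + 2 := by omega
  have hbb : (((n : Int) + 2) - 1).toNat = n + 1 := by omega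
  simp only [ha, hbb]
  norm_num [show (n : Int) + 2 - 1 = (n : Int) + 1 from by ring]

-- one pass of the loop, with the accumulator kept general, equals A's recursion at level n + 1
lemma funcAltLoop_eq_func (n : ℕ) : ∀ (q r acc : Int),
    funcAltLoop (2 ^ n) q r acc = acc + func ((n : Int) + 1) q r := by
  induction n with
  | zero =>
    intro q r acc
    rw [funcAltLoop, func]
    norm_num
    ring
  | succ n ih =>
    intro q r acc
    have hb : (1 : Int) < 2 ^ (n + 1) := by
      have h0 : (0 : Int) < 2 ^ n := by positivity
      calc (1 : Int) < 2 * 2 ^ n := by linarith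
        _ = 2 ^ (n + 1) := by ring
    have hdiv : (2 ^ (n + 1) : Int) / 2 = 2 ^ n := by
      rw [pow_succ]; exact Int.mul_ediv_cancel _ (by norm_num)
    have hsq : (2 : Int) ^ (2 * n + 2) = 2 ^ (n + 1) * 2 ^ (n + 1) := by
      rw [← pow_add]; ring_nf
    have hstep := func_step n q r
    rw [show ((((n + 1 : ℕ)) : Int) + 1) = (n : Int) + 2 from by push_cast; ring, hstep, hsq]
    rw [funcAltLoop, if_pos hb]
    simp only [hdiv, ih]
    by_cases hq : q ≥ 2 ^ (n + 1) <;> by_cases hr : r ≥ 2 ^ (n + 1) <;>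
      simp only [hq, hr, and_true, and_false, if_false, if_pos] <;> ring

-- ===== VERDICT (by name: the statement is the Claim_ definition above) =====
theorem func_spec : Claim_equal_func := by
  intro p q r _ hpre
  unfold Spec_func func_alt
  have hn : ((((p - 1).toNat : ℕ) : Int) + 1) = p := by
    have : (0 : Int) ≤ p - 1 := by exact sub_nonneg.mpr hpre
    omega
  rw [funcAltLoop_eq_func, hn, zero_add]
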